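-- pv_equiv track=rewrite | github.com/ffyuanda/15112-homework | homework/src/hw2-1.py | existInHand
-- ===== SOURCE A (Python) =====
-- import copy
--
-- def existInHand(word, hand):
--
--     handCopy = copy.copy(hand)
--     for i in word:
--
--         if(i in handCopy):
--             handCopy.remove(i)
--             continue
--
--         else: return False
--         handCopy = copy.copy(hand)
--
--     return True
-- ===== SOURCE B (Python) =====
-- def existInHand(word, hand):
--     need = {}
--     for ch in word:
--         need[ch] = need.get(ch, 0) + 1
--     have = {}
--     for x in hand:
--         have[x] = have.get(x, 0) + 1
--     return all(have.get(ch, 0) >= n for ch, n in need.items())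
-- ===== Notes on version B (the rewrite author's own statement) =====
-- stated objective: faster
-- what changed: Replaces A's per-letter linear scan-and-remove on a copied hand list with two frequency dictionaries built in one pass each, then a single count comparison over the word's distinct letters.
import Mathlib
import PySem

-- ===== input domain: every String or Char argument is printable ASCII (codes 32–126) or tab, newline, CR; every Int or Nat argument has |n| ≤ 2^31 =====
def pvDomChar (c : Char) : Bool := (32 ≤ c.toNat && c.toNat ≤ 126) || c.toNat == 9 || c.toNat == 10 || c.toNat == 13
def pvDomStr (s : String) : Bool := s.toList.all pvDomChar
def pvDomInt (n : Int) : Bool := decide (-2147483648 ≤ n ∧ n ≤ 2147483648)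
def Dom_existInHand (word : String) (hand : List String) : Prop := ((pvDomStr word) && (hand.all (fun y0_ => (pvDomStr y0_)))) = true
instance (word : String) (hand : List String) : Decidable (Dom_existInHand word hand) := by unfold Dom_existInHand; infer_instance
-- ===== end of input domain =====

-- B builds two frequency dictionaries in one pass each instead of A's per-letter scan-and-remove of a copied hand list.

-- ===== PORT A =====
-- the for-loop of A: for each letter, membership test then remove-first-occurrence on the working copy
def existInHandLoop (w : List Char) (handCopy : List String) : Bool :=
  match w with
  | [] => true
  | i :: rest =>
    if handCopy.contains (String.ofList [i]) then
      match PySem.List.remove? handCopy (String.ofList [i]) with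
      | some h' => existInHandLoop rest h'
      | none => false          -- unreachable: membership was just checked
    else false

def existInHand (word : String) (hand : List String) : Bool :=
  existInHandLoop word.toList hand

-- ===== PORT B =====
def existInHand_alt (word : String) (hand : List String) : Bool :=
  let need := (word.toList.map (fun c => String.ofList [c])).foldl
      (fun d ch => d.insert ch (d.getD ch 0 + 1)) PySem.Dict.empty
  let haveD := hand.foldl (fun d x => d.insert x (d.getD x 0 + 1)) PySem.Dict.empty
  need.items.all (fun (p : String × Int) => decide (p.2 ≤ haveD.getD p.1 0))

-- ===== PRECONDITION & SPEC =====
def Spec_existInHand (word : String) (hand : List String) (out : Bool) : Prop := out = existInHand_alt word hand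
instance (word : String) (hand : List String) (out : Bool) : Decidable (Spec_existInHand word hand out) := by unfold Spec_existInHand; infer_instance

-- ===== CLAIM (what is proved, stated in full; the proofs are below) =====
def Claim_equal_existInHand : Prop := ∀ (word : String) (hand : List String), Dom_existInHand word hand → Spec_existInHand word hand (existInHand word hand)

-- ===== LEMMAS AND PROOFS =====

-- A's loop succeeds iff the word letters form a submultiset of the hand
theorem existInHandLoop_iff (w : List Char) (h : List String) :
    existInHandLoop w h = true ↔ ∀ s, (w.map (fun c => String.ofList [c])).count s ≤ h.count s := by
  induction w generalizing h with
  | nil => simp [existInHandLoop]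
  | cons i rest ih =>
    by_cases hmem : String.ofList [i] ∈ h
    · rw [existInHandLoop]
      simp only [List.contains_eq_mem, hmem, decide_true, if_true,
        PySem.List.remove?_eq_some_erase h _ hmem]
      rw [ih]
      have hpos : 0 < h.count (String.ofList [i]) := List.count_pos_iff.mpr hmem
      constructor
      · intro hall s
        have h1 := hall s
        have h2 : List.count s (h.erase (String.ofList [i])) = List.count s h - if (String.ofList [i] == s) = true then 1 else 0 := List.count_erase
        by_cases hs : String.ofList [i] = s
        · subst hs
          simp only [beq_self_eq_true, if_true] at h2
          simp only [List.map_cons, List.count_cons_self]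
          omega
        · rw [if_neg (by simp [hs])] at h2
          simp only [List.map_cons, List.count_cons, beq_iff_eq, hs, if_false]
          omega
      · intro hall s
        have h1 := hall s
        have h2 : List.count s (h.erase (String.ofList [i])) = List.count s h - if (String.ofList [i] == s) = true then 1 else 0 := List.count_erase
        by_cases hs : String.ofList [i] = s
        · subst hs
          simp only [beq_self_eq_true, if_true] at h2
          simp only [List.map_cons, List.count_cons_self] at h1
          omega
        · rw [if_neg (by simp [hs])] at h2
          simp only [List.map_cons, List.count_cons, beq_iff_eq, hs, if_false] at h1
          omega
    · rw [existInHandLoop]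
      simp only [List.contains_eq_mem, hmem, decide_false, Bool.false_eq_true, if_false,
        false_iff, not_forall]
      refine ⟨String.ofList [i], ?_⟩
      rw [List.count_eq_zero_of_not_mem hmem]
      simp

-- B equals the count comparison over the word's distinct letters
theorem existInHand_alt_iff (word : String) (hand : List String) :
    existInHand_alt word hand = true ↔
      ∀ s, (word.toList.map (fun c => String.ofList [c])).count s ≤ hand.count s := by
  unfold existInHand_alt
  simp only [PySem.Dict.foldl_insert_getD_add_one_eq_counter, PySem.Dict.items_counter,
    PySem.Dict.getD_counter, List.all_map, List.all_eq_true, Function.comp,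
    decide_eq_true_eq]
  constructor
  · intro hall s
    by_cases hs : s ∈ PySem.Set.ofList (word.toList.map (fun c => String.ofList [c]))
    · exact_mod_cast hall s hs
    · rw [PySem.Set.mem_ofList] at hs
      rw [List.count_eq_zero_of_not_mem hs]
      omega
  · intro hall s _
    exact_mod_cast hall s

-- ===== VERDICT (by name: the statement is the Claim_ definition above) =====
theorem existInHand_spec : Claim_equal_existInHand := by
  intro word hand _
  unfold Spec_existInHand existInHand
  rcases hb : existInHand_alt word hand with _ | _
  · rcases ha : existInHandLoop word.toList hand with _ | _
    · rfl
    · exact absurd ((existInHand_alt_iff word hand).mpr ((existInHandLoop_iff _ _).mp ha))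
        (by simp [hb])
  · exact (existInHandLoop_iff _ _).mpr ((existInHand_alt_iff word hand).mp hb)
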